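-- pv_equiv track=rewrite | github.com/areutar/howto | src/numerical/RamanujanNumbers/ramanujan_numbers.py | get_ramanujan_numbers
-- ===== SOURCE A (Python) =====
-- def get_ramanujan_numbers(threshold):
--     sums = {}
--     result = {}
--
--     for i in range(threshold):
--         for j in range(i + 1, threshold):
--             current = i ** 3 + j ** 3
--             if current in sums:
--                 sums[current] = sums[current] + [i, j]
--             else:
--                 sums[current] = [i, j]
--
--     for sum, args in sums.items():
--         if len(args) > 2:
--             result[sum] = args
--
--     sorted_result = sorted(result.items())
--     return sorted_result
-- ===== SOURCE B (Python) =====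
-- def get_ramanujan_numbers(threshold):
--     pairs = [(i ** 3 + j ** 3, i, j)
--              for i in range(threshold)
--              for j in range(i + 1, threshold)]
--     pairs.sort(key=lambda t: t[0])  # stable: equal sums keep enumeration order
--     result = []
--     n = len(pairs)
--     idx = 0
--     while idx < n:
--         s = pairs[idx][0]
--         end = idx
--         flat = []
--         while end < n and pairs[end][0] == s:
--             flat.append(pairs[end][1])
--             flat.append(pairs[end][2])
--             end += 1
--         if end - idx >= 2:
--             result.append((s, flat))
--         idx = end
--     return result
-- ===== Notes on version B (the rewrite author's own statement) =====
-- stated objective: alternative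
-- what changed: Replaced A's dict-of-sums accumulation (plus a second filtering dict and a final sort of its items) by a flat enumeration of (i^3+j^3, i, j) triples, one stable sort by the sum, and a single linear grouping pass over the sorted list that keeps runs with at least two pairs.
import Mathlib
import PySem

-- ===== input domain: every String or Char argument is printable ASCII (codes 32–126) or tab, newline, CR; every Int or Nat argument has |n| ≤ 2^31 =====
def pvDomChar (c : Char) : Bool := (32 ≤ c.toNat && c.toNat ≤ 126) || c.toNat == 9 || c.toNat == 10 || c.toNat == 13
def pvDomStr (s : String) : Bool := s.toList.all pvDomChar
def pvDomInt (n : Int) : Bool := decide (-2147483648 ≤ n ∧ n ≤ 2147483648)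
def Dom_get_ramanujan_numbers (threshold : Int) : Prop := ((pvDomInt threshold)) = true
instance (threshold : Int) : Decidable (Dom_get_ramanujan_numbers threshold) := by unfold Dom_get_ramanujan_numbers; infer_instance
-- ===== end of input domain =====

-- B replaces A's dict accumulation by flat pair enumeration + stable sort by the cube sum + one
-- linear grouping pass over the sorted list (objective: alternative algorithm, similar cost).

-- ===== PORT A =====
-- the body of A's inner loop (dict upsert; 'current in sums' then append, else fresh entry)
def aStep (sums : PySem.Dict Int (List Int)) (i j : Int) : PySem.Dict Int (List Int) :=
  let current := i ^ 3 + j ^ 3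
  if sums.contains current then
    sums.insert current (sums.getD current [] ++ [i, j])
  else
    sums.insert current [i, j]

-- the body of A's second loop ('if len(args) > 2: result[sum] = args')
def aFilterStep (result : PySem.Dict Int (List Int)) (p : Int × List Int) :
    PySem.Dict Int (List Int) :=
  if p.2.length > 2 then result.insert p.1 p.2 else result

def get_ramanujan_numbers (threshold : Int) : List (Int × List Int) :=
  let sums : PySem.Dict Int (List Int) :=
    (PySem.List.pyRange 0 threshold 1).foldl (fun sums i =>
      (PySem.List.pyRange (i + 1) threshold 1).foldl (fun sums j => aStep sums i j) sums)
      ⟨[]⟩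
  let result : PySem.Dict Int (List Int) :=
    sums.items.foldl (fun result p => aFilterStep result p) ⟨[]⟩
  -- result's keys are distinct, so Python's sort of the (key, value) tuples is a sort by key
  PySem.List.sorted result.items (fun p => p.1) false

-- ===== PORT B =====
-- the flat pair enumeration [(i**3 + j**3, i, j) for i in range(threshold) for j in range(i+1, threshold)]
def altPairs (threshold : Int) : List (Int × Int × Int) :=
  (PySem.List.pyRange 0 threshold 1).flatMap (fun i =>
    (PySem.List.pyRange (i + 1) threshold 1).map (fun j => (i ^ 3 + j ^ 3, i, j)))

-- B's grouping loop: one pass over the sorted list with the result accumulator; each step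
-- consumes one maximal run of equal sums (the inner while loop) and appends it to the
-- result if it has at least two pairs
def altGroup (l : List (Int × Int × Int)) (acc : List (Int × List Int)) : List (Int × List Int) :=
  match l with
  | [] => acc
  | t :: rest =>
    let run := rest.takeWhile (fun u => u.1 == t.1)
    let acc' := if run.length + 1 ≥ 2 then
        acc ++ [(t.1, (t :: run).flatMap (fun u => [u.2.1, u.2.2]))]
      else acc
    altGroup (rest.dropWhile (fun u => u.1 == t.1)) acc'
termination_by l.length
decreasing_by
  simp only [List.length_cons]
  exact Nat.lt_succ_of_le (List.length_dropWhile_le _ _)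

def get_ramanujan_numbers_alt (threshold : Int) : List (Int × List Int) :=
  -- pairs.sort(key=lambda t: t[0]) ported as the standard library's stable sort
  altGroup ((altPairs threshold).mergeSort (fun u v => decide (u.1 ≤ v.1))) []

-- ===== PRECONDITION & SPEC =====
def Spec_get_ramanujan_numbers (threshold : Int) (out : List (Int × List Int)) : Prop := out = get_ramanujan_numbers_alt threshold
instance (threshold : Int) (out : List (Int × List Int)) : Decidable (Spec_get_ramanujan_numbers threshold out) := by unfold Spec_get_ramanujan_numbers; infer_instance

-- ===== CLAIM (what is proved, stated in full; the proofs are below) =====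
def Claim_equal_get_ramanujan_numbers : Prop := ∀ (threshold : Int), Dom_get_ramanujan_numbers threshold → Spec_get_ramanujan_numbers threshold (get_ramanujan_numbers threshold)

-- ===== LEMMAS AND PROOFS =====

-- A's loop body, rephrased over a flat (sum, i, j) triple: on the triples A's loops
-- actually visit (where u.1 = u.2.1 ^ 3 + u.2.2 ^ 3) this is exactly aStep
def tStep (d : PySem.Dict Int (List Int)) (u : Int × Int × Int) : PySem.Dict Int (List Int) :=
  if d.contains u.1 then d.insert u.1 (d.getD u.1 [] ++ [u.2.1, u.2.2])
  else d.insert u.1 [u.2.1, u.2.2]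

-- the per-sum entry both sides build: (s, [i, j, i, j, …] over the pairs with that sum)
def entryOf (L : List (Int × Int × Int)) (s : Int) : Int × List Int :=
  (s, (L.filter (fun u => u.1 == s)).flatMap (fun u => [u.2.1, u.2.2]))

-- bridge: A's nested loops are a single fold over the flat pair list
lemma bridgeA (threshold : Int) :
    (PySem.List.pyRange 0 threshold 1).foldl (fun sums i =>
      (PySem.List.pyRange (i + 1) threshold 1).foldl (fun sums j => aStep sums i j) sums)
      ⟨[]⟩
    = (altPairs threshold).foldl tStep ⟨[]⟩ := by
  unfold altPairs
  rw [List.foldl_flatMap]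
  apply PySem.List.foldl_congr_mem
  intro acc i hi
  rw [List.foldl_map]
  apply PySem.List.foldl_congr_mem
  intro acc2 j hj
  rfl


lemma dict_items_char (L : List (Int × Int × Int)) :
    (L.foldl tStep ⟨[]⟩).items
      = (PySem.List.dedup (L.map (·.1))).map (entryOf L) := by
  induction L using List.reverseRecOn with
  | nil => rfl
  | append_singleton L x ih =>
    rw [List.foldl_append, List.foldl_cons, List.foldl_nil]
    have hkeys : (L.foldl tStep ⟨[]⟩).keys = PySem.List.dedup (L.map (·.1)) := by
      show (L.foldl tStep ⟨[]⟩).items.map (·.1) = _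
      rw [ih, List.map_map]
      rw [show ((fun (x : Int × List Int) => x.1) ∘ entryOf L) = id from rfl, List.map_id]
    have hnodup : (L.foldl tStep ⟨[]⟩).keys.Nodup := by
      rw [hkeys, PySem.List.dedup_eq_ofList]; exact PySem.Set.nodup_ofList _
    have hdedup : PySem.List.dedup ((L ++ [x]).map (·.1))
        = PySem.Set.add (PySem.List.dedup (L.map (·.1))) x.1 := by
      simp only [List.map_append, List.map_cons, List.map_nil,
        PySem.List.dedup_eq_ofList]
      exact PySem.Set.ofList_append_singleton _ _
    by_cases hmem : x.1 ∈ PySem.List.dedup (L.map (·.1))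
    · -- key already present
      have hcont : (L.foldl tStep ⟨[]⟩).contains x.1 = true := by
        rw [PySem.Dict.contains_iff_mem_keys, hkeys]; exact hmem
      have hget : (L.foldl tStep ⟨[]⟩).getD x.1 [] = (entryOf L x.1).2 := by
        apply PySem.Dict.getD_of_get?_eq_some
        apply PySem.Dict.get?_of_mem_items _ _ hnodup
        rw [ih]
        exact List.mem_map_of_mem hmem
      rw [tStep, if_pos hcont, PySem.Dict.items_insert_of_contains _ _ hcont, ih,
        hdedup, PySem.Set.add_of_mem hmem, List.map_map]
      apply List.map_congr_left
      intro s hs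
      simp only [Function.comp_apply, entryOf, List.filter_append]
      by_cases hsx : s = x.1
      · subst hsx
        simp [hget, entryOf]
      · have : (x.1 == s) = false := by simp [Ne.symm hsx]
        simp [hsx, this]
    · -- new key
      have hcont : (L.foldl tStep ⟨[]⟩).contains x.1 = false := by
        rw [Bool.eq_false_iff]
        intro h
        exact hmem (hkeys ▸ (PySem.Dict.contains_iff_mem_keys _ _).1 h)
      have hx_not : x.1 ∉ L.map (·.1) := fun h => hmem ((PySem.List.mem_dedup _ _).2 h)
      rw [tStep, if_neg (by simp [hcont]), PySem.Dict.items_insert_of_not_contains _ _ hcont, ih,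
        hdedup, PySem.Set.add_of_not_mem hmem]
      rw [List.map_append]
      congr 1
      · apply List.map_congr_left
        intro s hs
        have hsx : x.1 ≠ s := by rintro rfl; exact hmem hs
        have : (x.1 == s) = false := by simp [hsx]
        simp only [entryOf, List.filter_append, List.filter_cons, List.filter_nil, this,
          Bool.false_eq_true]
        simp
      · simp only [List.map_cons, List.map_nil, entryOf, List.filter_append]
        have hfl : L.filter (fun u => u.1 == x.1) = [] := by
          rw [List.filter_eq_nil_iff]
          intro u hu
          simp only [beq_iff_eq]
          intro h; exact hx_not (h ▸ List.mem_map_of_mem hu)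
        simp [hfl]

lemma filter_fold_aux (l : List (Int × List Int)) :
    ∀ (r : PySem.Dict Int (List Int)), (l.map (·.1)).Nodup →
      (∀ p ∈ l, r.contains p.1 = false) →
      (l.foldl (fun result p => aFilterStep result p) r).items
        = r.items ++ l.filter (fun p => p.2.length > 2) := by
  induction l with
  | nil => intro r _ _; simp
  | cons p l ih =>
    intro r hnd hdis
    rw [List.foldl_cons]
    by_cases hp : p.2.length > 2
    · have hstep : aFilterStep r p = r.insert p.1 p.2 := by simp [aFilterStep, hp]
      have hcont := hdis p (List.mem_cons_self ..)
      have hitems : (r.insert p.1 p.2).items = r.items ++ [p] := by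
        rw [PySem.Dict.items_insert_of_not_contains _ _ hcont]
      rw [hstep, ih _ (by simp at hnd ⊢; exact hnd.2) ?_, hitems]
      · simp [hp]
      · intro q hq
        have hne : (q.1 == p.1) = false := by
          simp only [beq_eq_false_iff_ne, ne_eq]
          intro h
          have := (List.nodup_cons.1 hnd).1
          apply this
          show p.1 ∈ _
          rw [← h]
          exact List.mem_map_of_mem hq
        rw [PySem.Dict.contains_insert, hne, Bool.false_or]
        exact hdis q (List.mem_cons_of_mem _ hq)
    · have hstep : aFilterStep r p = r := by simp [aFilterStep, hp]
      rw [hstep, ih _ (by simp at hnd ⊢; exact hnd.2)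
        (fun q hq => hdis q (List.mem_cons_of_mem _ hq))]
      simp [hp]

lemma insertBy_append_not (b : (Int×Int×Int) → (Int×Int×Int) → Bool) (x : Int×Int×Int) :
    ∀ (l r : List (Int×Int×Int)), (∀ y ∈ l, b x y = false) →
      PySem.List.insertBy b x (l ++ r) = l ++ PySem.List.insertBy b x r := by
  intro l
  induction l with
  | nil => intro r _; simp
  | cons y l ih =>
    intro r h
    have hy : b x y = false := h y (List.mem_cons_self ..)
    show PySem.List.insertBy b x (y :: (l ++ r)) = _
    rw [show PySem.List.insertBy b x (y :: (l ++ r))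
        = if b x y then x :: y :: (l ++ r) else y :: PySem.List.insertBy b x (l ++ r) from rfl]
    rw [hy]
    simp only [Bool.false_eq_true, if_false, List.cons_append]
    rw [ih r (fun z hz => h z (List.mem_cons_of_mem _ hz))]

lemma insertBy_all_true (b : (Int×Int×Int) → (Int×Int×Int) → Bool) (x : Int×Int×Int)
    (r : List (Int×Int×Int)) (h : ∀ y ∈ r, b x y = true) :
    PySem.List.insertBy b x r = x :: r := by
  cases r with
  | nil => rfl
  | cons y ys =>
    rw [show PySem.List.insertBy b x (y :: ys)
        = if b x y then x :: y :: ys else y :: PySem.List.insertBy b x ys from rfl]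
    rw [h y (List.mem_cons_self ..)]
    simp

lemma insertBy_grouped (x : Int×Int×Int) (g : Int → List (Int×Int×Int)) :
    ∀ (S : List Int), S.Pairwise (· < ·) → x.1 ∈ S →
      (∀ s ∈ S, ∀ u ∈ g s, u.1 = s) →
      PySem.List.insertBy (fun a b => decide (a.1 < b.1)) x (S.flatMap g)
        = S.flatMap (fun s => g s ++ if x.1 == s then [x] else []) := by
  intro S
  induction S with
  | nil => intro _ h; simp at h
  | cons s S ih =>
    intro hpw hmem hg
    rw [List.flatMap_cons, List.flatMap_cons]
    by_cases hx : x.1 = s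
    · rw [insertBy_append_not _ _ _ _ (by
        intro y hy
        rw [hg s (List.mem_cons_self ..) y hy, hx]
        simp)]
      rw [insertBy_all_true _ _ _ (by
        intro y hy
        obtain ⟨s', hs', hy'⟩ := List.mem_flatMap.1 hy
        rw [hg s' (List.mem_cons_of_mem _ hs') y hy', hx]
        simp only [decide_eq_true_eq]
        exact (List.pairwise_cons.1 hpw).1 s' hs')]
      have : S.flatMap (fun s' => g s' ++ if x.1 == s' then [x] else []) = S.flatMap g := by
        apply List.flatMap_congr  -- name?
        intro s' hs'
        have : x.1 ≠ s' := by
          rw [hx]; exact ne_of_lt ((List.pairwise_cons.1 hpw).1 s' hs')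
        simp [this]
      rw [this, if_pos (by simp [hx])]
      simp
    · have hmem' : x.1 ∈ S := by cases List.mem_cons.1 hmem with
        | inl h => exact absurd h hx
        | inr h => exact h
      have hlt : s < x.1 := (List.pairwise_cons.1 hpw).1 _ hmem'
      rw [insertBy_append_not _ _ _ _ (by
        intro y hy
        rw [hg s (List.mem_cons_self ..) y hy]
        simp only [decide_eq_false_iff_not, not_lt]
        exact le_of_lt hlt)]
      rw [ih (List.pairwise_cons.1 hpw).2 hmem'
        (fun s' hs' => hg s' (List.mem_cons_of_mem _ hs'))]
      rw [if_neg (by simp [hx])]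
      simp

lemma sorted_groups (S : List Int) (hS : S.Pairwise (· < ·)) :
    ∀ (L : List (Int × Int × Int)), (∀ u ∈ L, u.1 ∈ S) →
      PySem.List.sorted L (fun u => u.1) false
        = S.flatMap (fun s => L.filter (fun u => u.1 == s)) := by
  intro L
  induction L using List.reverseRecOn with
  | nil => simp [PySem.List.sorted]
  | append_singleton L x ih =>
    intro hmem
    rw [PySem.List.sorted_eq_foldl_insertBy, List.foldl_append, List.foldl_cons, List.foldl_nil,
      ← PySem.List.sorted_eq_foldl_insertBy,
      ih (fun u hu => hmem u (List.mem_append_left _ hu))]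
    rw [insertBy_grouped x _ S hS (hmem x (List.mem_append_right _ (List.mem_cons_self ..)))
      (by intro s _ u hu; exact beq_iff_eq.1 (List.mem_filter.1 hu).2)]
    apply List.flatMap_congr
    intro s hs
    rw [List.filter_append]
    congr 1
    by_cases h : x.1 = s <;> simp [h]

lemma takeWhile_group (p : (Int×Int×Int) → Bool) :
    ∀ (l r : List (Int×Int×Int)), (∀ u ∈ l, p u = true) → (∀ u ∈ r, p u = false) →
      (l ++ r).takeWhile p = l ∧ (l ++ r).dropWhile p = r := by
  intro l
  induction l with
  | nil =>
    intro r _ hr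
    cases r with
    | nil => simp
    | cons y ys =>
      have := hr y (List.mem_cons_self ..)
      simp [this]
  | cons y l ih =>
    intro r hl hr
    have hy := hl y (List.mem_cons_self ..)
    have := ih r (fun u hu => hl u (List.mem_cons_of_mem _ hu)) hr
    simp [hy, this.1, this.2]

lemma altGroup_cons (t : Int×Int×Int) (rest : List (Int×Int×Int))
    (acc : List (Int × List Int)) :
    altGroup (t :: rest) acc
      = altGroup (rest.dropWhile (fun u => u.1 == t.1))
          (if (rest.takeWhile (fun u => u.1 == t.1)).length + 1 ≥ 2 then
            acc ++ [(t.1, (t :: rest.takeWhile (fun u => u.1 == t.1)).flatMap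
              (fun u => [u.2.1, u.2.2]))]
           else acc) := by
  rw [altGroup]

lemma flat_length (l : List (Int×Int×Int)) :
    (l.flatMap (fun u => [u.2.1, u.2.2])).length = 2 * l.length := by
  induction l with
  | nil => rfl
  | cons t l ih => simp [List.flatMap_cons, ih]; omega

lemma altGroup_flatMap (g : Int → List (Int × Int × Int)) :
    ∀ (S : List Int), S.Pairwise (· < ·) →
      (∀ s ∈ S, g s ≠ [] ∧ ∀ u ∈ g s, u.1 = s) →
      ∀ (acc : List (Int × List Int)),
      altGroup (S.flatMap g) acc
        = acc ++ (S.map (fun s => (s, (g s).flatMap (fun u => [u.2.1, u.2.2])))).filter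
            (fun p => p.2.length > 2) := by
  intro S
  induction S with
  | nil => intro _ _ acc; simp only [List.flatMap_nil, List.map_nil, List.filter_nil]; rw [altGroup]; simp
  | cons s S ih =>
    intro hpw hg acc
    obtain ⟨hne, hkey⟩ := hg s (List.mem_cons_self ..)
    obtain ⟨t, run', hts⟩ : ∃ t run', g s = t :: run' := by
      cases h : g s with
      | nil => exact absurd h hne
      | cons a b => exact ⟨a, b, rfl⟩
    have hts1 : t.1 = s := hkey t (by rw [hts]; exact List.mem_cons_self ..)
    rw [List.flatMap_cons, hts]
    rw [List.cons_append, altGroup_cons]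
    have htw := takeWhile_group (fun u => u.1 == t.1) run' (S.flatMap g)
      (by intro u hu
          have : u.1 = s := hkey u (by rw [hts]; exact List.mem_cons_of_mem _ hu)
          simp [this, hts1])
      (by intro u hu
          obtain ⟨s', hs', hu'⟩ := List.mem_flatMap.1 hu
          have : u.1 = s' := (hg s' (List.mem_cons_of_mem _ hs')).2 u hu'
          have hlt : s < s' := (List.pairwise_cons.1 hpw).1 s' hs'
          simp [this, hts1]
          omega)
    rw [htw.1, htw.2, ih (List.pairwise_cons.1 hpw).2
      (fun s' hs' => hg s' (List.mem_cons_of_mem _ hs')) _]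
    rw [List.map_cons, List.filter_cons]
    have hlen : ((g s).flatMap (fun u => [u.2.1, u.2.2])).length = 2 * (run'.length + 1) := by
      rw [flat_length, hts]; simp
    by_cases hc : run'.length + 1 ≥ 2
    · rw [if_pos hc]
      have : (decide (((s, (g s).flatMap (fun u => [u.2.1, u.2.2])).2.length > 2)) = true) := by
        simp only [hlen, decide_eq_true_eq]; omega
      rw [this]
      simp [hts, hts1]
    · rw [if_neg hc]
      have : (decide (((s, (g s).flatMap (fun u => [u.2.1, u.2.2])).2.length > 2)) = false) := by
        simp only [hlen, decide_eq_false_iff_not]; omega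
      rw [this]
      simp

-- the stable mergeSort of the pair list is the same grouped normal form
lemma mergeSort_groups (S : List Int) (hS : S.Pairwise (· < ·))
    (L : List (Int × Int × Int)) (hmem : ∀ u ∈ L, u.1 ∈ S) :
    L.mergeSort (fun u v => decide (u.1 ≤ v.1))
      = S.flatMap (fun s => L.filter (fun u => u.1 == s)) := by
  have htrans : ∀ (a b c : Int × Int × Int),
      (decide (a.1 ≤ b.1)) = true → (decide (b.1 ≤ c.1)) = true →
      (decide (a.1 ≤ c.1)) = true := by
    intro a b c h1 h2
    simp only [decide_eq_true_eq] at *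
    omega
  have htot : ∀ (a b : Int × Int × Int),
      ((decide (a.1 ≤ b.1)) || (decide (b.1 ≤ a.1))) = true := by
    intro a b
    simp only [Bool.or_eq_true, decide_eq_true_eq]
    omega
  set le := fun (u v : Int × Int × Int) => decide (u.1 ≤ v.1) with hle
  set M := L.mergeSort le with hM
  have hperm : M.Perm L := List.mergeSort_perm L le
  have hpw : M.Pairwise (fun a b => le a b = true) :=
    List.pairwise_mergeSort htrans htot L
  have hsorted : PySem.List.sorted M (fun u => u.1) false = M :=
    PySem.List.sorted_eq_self_of_pairwise M (fun u => u.1)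
      (hpw.imp (by intro a b h; simpa [hle] using h))
  have hMS : M = S.flatMap (fun s => M.filter (fun u => u.1 == s)) := by
    conv_lhs => rw [← hsorted]
    exact sorted_groups S hS M (fun u hu => hmem u (hperm.mem_iff.1 hu))
  have hfil : ∀ s ∈ S, M.filter (fun u => u.1 == s) = L.filter (fun u => u.1 == s) := by
    intro s hs
    have hpairw : (L.filter (fun u => u.1 == s)).Pairwise (fun a b => le a b = true) := by
      apply List.pairwise_of_forall_mem_list
      intro a ha b hb
      have ha' := beq_iff_eq.1 (List.mem_filter.1 ha).2
      have hb' := beq_iff_eq.1 (List.mem_filter.1 hb).2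
      simp [hle, ha', hb']
    have hsub : (L.filter (fun u => u.1 == s)).Sublist M :=
      List.sublist_mergeSort htrans htot hpairw List.filter_sublist
    have hsub2 : (L.filter (fun u => u.1 == s)).Sublist (M.filter (fun u => u.1 == s)) := by
      have := hsub.filter (fun u => u.1 == s)
      rwa [List.filter_filter, show (fun (u : Int×Int×Int) => u.1 == s && (u.1 == s)) =
        (fun u => u.1 == s) from by funext u; rw [Bool.and_self]] at this
    have hlen : (L.filter (fun u => u.1 == s)).length
        = (M.filter (fun u => u.1 == s)).length := ((hperm.filter _).length_eq).symm
    exact (hsub2.eq_of_length hlen).symm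
  rw [hMS]
  exact List.flatMap_congr hfil

lemma ramanujan_agree (t : Int) :
    get_ramanujan_numbers t = get_ramanujan_numbers_alt t := by
  unfold get_ramanujan_numbers get_ramanujan_numbers_alt
  rw [bridgeA]
  set L := altPairs t with hLdef
  set dL := PySem.List.dedup (L.map (·.1)) with hdL
  set S := PySem.List.sorted dL (fun s => s) false with hSdef
  have hSpw : S.Pairwise (· < ·) := by
    rw [hSdef, hdL, PySem.List.dedup_eq_ofList]
    exact PySem.List.sorted_ofList_pairwise_lt _
  have hmemS : ∀ s : Int, s ∈ S ↔ s ∈ L.map (·.1) := by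
    intro s
    rw [hSdef, PySem.List.mem_sorted, hdL, PySem.List.mem_dedup]
  have hnodupdL : dL.Nodup := by
    rw [hdL, PySem.List.dedup_eq_ofList]; exact PySem.Set.nodup_ofList _
  have hA : (List.foldl (fun result p => aFilterStep result p) (⟨[]⟩ : PySem.Dict Int (List Int))
      ((L.foldl tStep ⟨[]⟩).items)).items
      = (dL.map (entryOf L)).filter (fun p => p.2.length > 2) := by
    rw [dict_items_char]
    rw [filter_fold_aux _ _ ?_ ?_]
    · rfl
    · rw [List.map_map]
      rw [show ((fun (x : Int × List Int) => x.1) ∘ entryOf L) = id from rfl, List.map_id]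
      exact hnodupdL
    · intro p _; rfl
  show PySem.List.sorted (List.foldl (fun result p => aFilterStep result p) ⟨[]⟩
      (List.foldl tStep ⟨[]⟩ L).items).items (fun p => p.1) false
      = altGroup (L.mergeSort (fun u v => decide (u.1 ≤ v.1))) []
  rw [hA]
  have hB : L.mergeSort (fun u v => decide (u.1 ≤ v.1))
      = S.flatMap (fun s => L.filter (fun u => u.1 == s)) :=
    mergeSort_groups S hSpw L (fun u hu => (hmemS u.1).2 (List.mem_map_of_mem hu))
  rw [hB, altGroup_flatMap _ S hSpw ?_ []]
  · rw [List.nil_append]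
    have hfun : (fun s => (s, (L.filter (fun u => u.1 == s)).flatMap (fun u => [u.2.1, u.2.2])))
        = entryOf L := rfl
    rw [hfun]
    apply PySem.List.sorted_eq_of_perm_of_pairwise_lt
    · exact ((PySem.List.sorted_perm dL (fun s => s) false).map (entryOf L)).filter _
    · apply List.Pairwise.filter
      rw [List.pairwise_map]
      exact hSpw
  · intro s hs
    have hsmem : s ∈ L.map (·.1) := (hmemS s).1 hs
    obtain ⟨u, hu, hus⟩ := List.mem_map.1 hsmem
    constructor
    · apply List.ne_nil_of_mem (a := u)
      rw [List.mem_filter]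
      exact ⟨hu, by simp [hus]⟩
    · intro v hv
      exact beq_iff_eq.1 (List.mem_filter.1 hv).2

-- ===== VERDICT (by name: the statement is the Claim_ definition above) =====
theorem get_ramanujan_numbers_spec : Claim_equal_get_ramanujan_numbers := by
  intro threshold _
  exact ramanujan_agree threshold
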